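-- pv_equiv track=rewrite | github.com/tobiichi3227/Moonafly | src/develop_mode.py | get_ls_command_output
-- ===== SOURCE A (Python) =====
-- def get_ls_command_output(files: list, tab_size: int, tab_count: int) -> str:
--     output = ""
--     columns = 3
--     column_len = [0] * columns
--     for column_index in range(min(columns, len(files))):
--         # group the files with vertical lines and {columns} groups
--         grouped_files = [
--             file
--             for index, file in enumerate(files)
--             if index % columns == column_index
--         ]
--         column_len[column_index] = max(
--             len(file_name) for file_name in grouped_files
--         )
--
--     for index, file in enumerate(files):
--         output += file + ' ' * (
--             column_len[index % columns] - len(file) + 2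
--             if index % columns != columns - 1
--             else 0
--         )
--         if index % columns == columns - 1 and index != len(files) - 1:
--             output += '\n' + ' ' * tab_size * tab_count
--
--     return output
-- ===== SOURCE B (Python) =====
-- def get_ls_command_output(files: list, tab_size: int, tab_count: int) -> str:
--     # One pass computes the three column widths; output is built row-by-row and joined.
--     w0 = w1 = w2 = 0
--     for index, file in enumerate(files):
--         if index % 3 == 0:
--             w0 = max(w0, len(file))
--         elif index % 3 == 1:
--             w1 = max(w1, len(file))
--         else:
--             w2 = max(w2, len(file))
--     widths = (w0, w1, w2)
--     rows = []
--     rest = files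
--     while rest:
--         row, rest = rest[:3], rest[3:]
--         rows.append(''.join(
--             f if c == 2 else f + ' ' * (widths[c] - len(f) + 2)
--             for c, f in enumerate(row)
--         ))
--     if len(rows) < 2:  # no row break: never build the (possibly huge) separator
--         return rows[0] if rows else ''
--     return ('\n' + ' ' * tab_size * tab_count).join(rows)
-- ===== Notes on version B (the rewrite author's own statement) =====
-- stated objective: alternative
-- what changed: B computes the three column widths in a single accumulating pass over the files (instead of A's per-column enumerate-filter-max passes) and builds the output by rendering rows of three files and joining them with the separator (instead of A's index-modular character-by-character fold).
import Mathlib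
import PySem

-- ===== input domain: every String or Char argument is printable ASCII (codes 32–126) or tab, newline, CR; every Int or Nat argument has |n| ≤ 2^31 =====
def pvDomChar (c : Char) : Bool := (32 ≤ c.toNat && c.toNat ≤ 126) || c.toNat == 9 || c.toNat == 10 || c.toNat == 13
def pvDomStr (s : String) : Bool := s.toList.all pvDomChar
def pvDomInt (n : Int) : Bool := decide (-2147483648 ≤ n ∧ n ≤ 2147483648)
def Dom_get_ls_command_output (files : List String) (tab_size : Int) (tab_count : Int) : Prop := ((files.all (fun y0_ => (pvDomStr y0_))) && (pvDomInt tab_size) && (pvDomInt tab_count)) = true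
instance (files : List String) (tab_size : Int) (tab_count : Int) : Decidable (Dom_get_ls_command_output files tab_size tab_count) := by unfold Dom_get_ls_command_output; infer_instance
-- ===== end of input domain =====

-- B replaces A's per-column filter-and-max width passes by one accumulating pass and builds the
-- output as rows of three joined by the separator (objective: alternative decomposition, same cost).

-- ===== PORT A =====
-- literal transliteration of A; the `max(...)` generator is always nonempty (column_index < len(files)),
-- so the `.getD 0` branch of the ported `max?` is never used
def get_ls_command_output (files : List String) (tab_size : Int) (tab_count : Int) : String :=
  let columns : Int := 3
  let column_len :=
    (PySem.List.pyRange 0 (min columns ((files.length : Int))) 1).foldl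
      (fun cl column_index =>
        cl.set column_index.toNat
          ((PySem.List.max?
              ((((PySem.List.enumerate files).filter
                    (fun p => PySem.Int.mod p.1 columns == column_index)).map (·.2)).map
                (fun file_name => PySem.Str.len file_name))
              (fun x => x)).getD 0))
      (List.replicate 3 (0 : Int))
  (PySem.List.enumerate files).foldl
    (fun output p =>
      let output := output ++ p.2 ++ String.ofList (List.replicate
        (if PySem.Int.mod p.1 columns ≠ columns - 1 then
            PySem.List.pyGetD column_len (PySem.Int.mod p.1 columns) 0 - PySem.Str.len p.2 + 2
          else 0).toNat ' ')
      if PySem.Int.mod p.1 columns = columns - 1 ∧ p.1 ≠ (files.length : Int) - 1 then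
        output ++ ("\n" ++ String.ofList (List.replicate (tab_size.toNat * tab_count.toNat) ' '))
      else output)
    ""

-- ===== PORT B =====
def pvWidthsStep (w : Int × Int × Int) (p : Int × String) : Int × Int × Int :=
  if PySem.Int.mod p.1 3 = 0 then (max w.1 (PySem.Str.len p.2), w.2.1, w.2.2)
  else if PySem.Int.mod p.1 3 = 1 then (w.1, max w.2.1 (PySem.Str.len p.2), w.2.2)
  else (w.1, w.2.1, max w.2.2 (PySem.Str.len p.2))

def pvWidthAt (w : Int × Int × Int) (c : Int) : Int :=
  if c = 0 then w.1 else if c = 1 then w.2.1 else w.2.2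

def pvRenderRow (w : Int × Int × Int) (row : List String) : String :=
  PySem.Str.join "" ((PySem.List.enumerate row).map (fun p =>
    if p.1 = 2 then p.2
    else p.2 ++ String.ofList (List.replicate (pvWidthAt w p.1 - PySem.Str.len p.2 + 2).toNat ' ')))

def pvRows (w : Int × Int × Int) : List String → List String
  | [] => []
  | f :: rest => pvRenderRow w (f :: rest.take 2) :: pvRows w (rest.drop 2)
termination_by fs => fs.length
decreasing_by simp

def get_ls_command_output_alt (files : List String) (tab_size : Int) (tab_count : Int) : String :=
  let w := (PySem.List.enumerate files).foldl pvWidthsStep (0, 0, 0)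
  let rows := pvRows w files
  if rows.length < 2 then
    match rows with
    | [] => ""
    | r :: _ => r
  else
    PySem.Str.join ("\n" ++ String.ofList (List.replicate (tab_size.toNat * tab_count.toNat) ' '))
      rows

-- ===== PRECONDITION & SPEC =====
def Spec_get_ls_command_output (files : List String) (tab_size : Int) (tab_count : Int) (out : String) : Prop := out = get_ls_command_output_alt files tab_size tab_count
instance (files : List String) (tab_size : Int) (tab_count : Int) (out : String) : Decidable (Spec_get_ls_command_output files tab_size tab_count out) := by unfold Spec_get_ls_command_output; infer_instance

-- ===== CLAIM (what is proved, stated in full; the proofs are below) =====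
def Claim_equal_get_ls_command_output : Prop := ∀ (files : List String) (tab_size : Int) (tab_count : Int), Dom_get_ls_command_output files tab_size tab_count → Spec_get_ls_command_output files tab_size tab_count (get_ls_command_output files tab_size tab_count)

-- ===== LEMMAS AND PROOFS =====

-- canonical width of column c over an enumerated file list (the value both programs compute)
def pvW (c : Int) (l : List (Int × String)) : Int :=
  ((((l.filter (fun p => PySem.Int.mod p.1 3 == c)).map (·.2)).map
      (fun file_name => PySem.Str.len file_name)).foldl max 0)

lemma pvLen_nonneg (f : String) : 0 ≤ PySem.Str.len f := by
  simp [PySem.Str.len_eq]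

lemma pvFoldlMax (l : List Int) (a b : Int) : l.foldl max (max a b) = max a (l.foldl max b) := by
  induction l generalizing a b with
  | nil => rfl
  | cons x t ih =>
    simp only [List.foldl_cons]
    rw [max_assoc, ih]

lemma pvFoldlMaxNN (l : List Int) (x : Int) (hx : 0 ≤ x) :
    l.foldl max x = max x (l.foldl max 0) := by
  conv_lhs => rw [← max_eq_left hx]
  rw [pvFoldlMax]

lemma pvMaxGetD (l : List Int) (h : ∀ x ∈ l, 0 ≤ x) :
    (PySem.List.max? l (fun x => x)).getD 0 = l.foldl max 0 := by
  cases l with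
  | nil =>
    have : PySem.List.max? ([] : List Int) (fun x => x) = none := by
      rw [PySem.List.max?_eq_none_iff]
    simp [this]
  | cons x t =>
    rw [PySem.List.max?_id_cons]
    have hx : 0 ≤ x := h x (List.mem_cons_self ..)
    have : max (0 : Int) x = x := max_eq_right hx
    simp only [Option.getD_some, List.foldl_cons, this]

lemma pvW_nonneg (c : Int) (l : List (Int × String)) : 0 ≤ pvW c l :=
  (PySem.List.le_foldl_max _ 0).1

lemma pvWidths_eq : ∀ (m : Nat) (fs : List String), fs.length = m → ∀ (s : Int), 0 ≤ s → s % 3 = 0 →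
    ∀ w0 w1 w2 : Int, 0 ≤ w0 → 0 ≤ w1 → 0 ≤ w2 →
    (PySem.List.enumerate fs s).foldl pvWidthsStep (w0, w1, w2)
      = (max w0 (pvW 0 (PySem.List.enumerate fs s)),
         max w1 (pvW 1 (PySem.List.enumerate fs s)),
         max w2 (pvW 2 (PySem.List.enumerate fs s))) := by
  intro m
  induction m using Nat.strong_induction_on with
  | _ m ih =>
  intro fs hlen s hs hmod w0 w1 w2 h0 h1 h2
  have d0 : (3:Int) ∣ s := by omega
  have d1 : ¬ (3:Int) ∣ (s+1) := by omega
  have d2 : ¬ (3:Int) ∣ (s+1+1) := by omega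
  have e1 : (s+1) % 3 = 1 := by omega
  have e2 : (s+1+1) % 3 = 2 := by omega
  rcases fs with _ | ⟨a, _ | ⟨b, _ | ⟨c, rest⟩⟩⟩
  · simp [PySem.List.enumerate_nil, pvW, max_eq_left h0, max_eq_left h1, max_eq_left h2]
  · simp [PySem.List.enumerate_cons, PySem.List.enumerate_nil, pvWidthsStep, pvW, hmod, d0,
      max_eq_left h1, max_eq_left h2, max_eq_right (Int.natCast_nonneg _), max_assoc]
  · simp [PySem.List.enumerate_cons, PySem.List.enumerate_nil, pvWidthsStep, pvW, hmod, d0, d1, e1,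
      max_eq_left h2, max_eq_right (Int.natCast_nonneg _), max_assoc]
  · have hrest := ih (rest.length) (by simp at hlen; omega) rest rfl (s + 1 + 1 + 1)
      (by omega) (by omega) (max w0 (PySem.Str.len a)) (max w1 (PySem.Str.len b))
      (max w2 (PySem.Str.len c)) (le_trans h0 (le_max_left _ _)) (le_trans h1 (le_max_left _ _))
      (le_trans h2 (le_max_left _ _))
    simp only [PySem.List.enumerate_cons, List.foldl_cons]
    have s1 : pvWidthsStep (w0, w1, w2) (s, a) = (max w0 (PySem.Str.len a), w1, w2) := by
      simp [pvWidthsStep, hmod, d0]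
    have s2 : pvWidthsStep (max w0 (PySem.Str.len a), w1, w2) (s + 1, b)
        = (max w0 (PySem.Str.len a), max w1 (PySem.Str.len b), w2) := by
      simp [pvWidthsStep, d1, e1]
    have s3 : pvWidthsStep (max w0 (PySem.Str.len a), max w1 (PySem.Str.len b), w2) (s + 1 + 1, c)
        = (max w0 (PySem.Str.len a), max w1 (PySem.Str.len b), max w2 (PySem.Str.len c)) := by
      simp [pvWidthsStep, d2, e2]
    rw [s1, s2, s3, hrest]
    simp only [pvW, PySem.List.enumerate_cons, List.filter_cons, List.map_cons, hmod, e1, e2]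
    norm_num [d0, d1, d2, hmod, e1, e2]
    rw [pvFoldlMaxNN _ _ (Int.natCast_nonneg _), pvFoldlMaxNN _ _ (Int.natCast_nonneg _),
      pvFoldlMaxNN _ _ (Int.natCast_nonneg _)]
    simp [max_assoc, PySem.Str.len_eq]

lemma pvJoinNil (sep : String) : PySem.Str.join sep [] = "" := rfl

lemma pvJoinSingleton (sep x : String) : PySem.Str.join sep [x] = x := by
  simp [PySem.Str.join]

lemma pvJoinCons (sep x y : String) (l : List String) :
    PySem.Str.join sep (x :: y :: l) = x ++ sep ++ PySem.Str.join sep (y :: l) := by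
  simp [PySem.Str.join, PySem.Chars.join_cons_cons, String.append_assoc]

lemma pvFormat_eq (cl : List Int) (W0 W1 W2 : Int) (hcl : cl = [W0, W1, W2]) (sep : String) (n : Int) :
    ∀ (m : Nat) (fs : List String), fs.length = m → ∀ (s : Int) (acc : String), 0 ≤ s → s % 3 = 0 →
    s + fs.length = n →
    (PySem.List.enumerate fs s).foldl
      (fun output p =>
        let output := output ++ p.2 ++ String.ofList (List.replicate
          (if PySem.Int.mod p.1 3 ≠ 3 - 1 then
              PySem.List.pyGetD cl (PySem.Int.mod p.1 3) 0 - PySem.Str.len p.2 + 2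
            else 0).toNat ' ')
        if PySem.Int.mod p.1 3 = 3 - 1 ∧ p.1 ≠ n - 1 then output ++ sep else output)
      acc
    = acc ++ PySem.Str.join sep (pvRows (W0, W1, W2) fs) := by
  intro m
  induction m using Nat.strong_induction_on with
  | _ m ih =>
  intro fs hlen s acc hs hmod hn
  have em1 : (s + 1) % 3 = 1 := by omega
  have em2 : (s + 1 + 1) % 3 = 2 := by omega
  rcases fs with _ | ⟨a, _ | ⟨b, _ | ⟨c, rest⟩⟩⟩
  · simp [PySem.List.enumerate_nil, pvRows, PySem.Str.join]
  · simp [PySem.List.enumerate_cons, PySem.List.enumerate_nil, hmod, hcl, pvRows, pvRenderRow,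
      pvWidthAt, pvJoinSingleton, pvJoinNil, pvJoinSingleton, pvJoinCons, PySem.List.pyGetD, PySem.List.pyGet?, PySem.List.pyIdx?, String.append_assoc]
  · simp [PySem.List.enumerate_cons, PySem.List.enumerate_nil, hmod, em1, hcl, pvRows, pvRenderRow,
      pvWidthAt, pvJoinNil, pvJoinSingleton, pvJoinCons, PySem.List.pyGetD, PySem.List.pyGet?, PySem.List.pyIdx?, String.append_assoc]
  · simp only [PySem.List.enumerate_cons, List.foldl_cons]
    rcases rest with _ | ⟨d, rest'⟩
    · have hlast : s + 1 + 1 = n - 1 := by simp at hn; omega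
      have hlast2 : (n - 1) % 3 = 2 := by omega
      simp [PySem.List.enumerate_nil, hmod, em1, em2, hlast, hlast2, hcl, pvRows, pvRenderRow,
        pvWidthAt, pvJoinNil, pvJoinSingleton, pvJoinCons, PySem.List.pyGetD, PySem.List.pyGet?, PySem.List.pyIdx?, String.append_assoc]
    · have hnotlast : s + 1 + 1 ≠ n - 1 := by simp at hn; omega
      rw [ih (d :: rest').length (by simp at hlen ⊢; omega) (d :: rest') rfl (s + 1 + 1 + 1) _
        (by omega) (by omega) (by simp at hn ⊢; omega)]
      have hrows : pvRows (W0, W1, W2) (a :: b :: c :: d :: rest')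
          = pvRenderRow (W0, W1, W2) [a, b, c] :: pvRows (W0, W1, W2) (d :: rest') := by
        simp [pvRows]
      obtain ⟨y, l, hyl⟩ : ∃ y l, pvRows (W0, W1, W2) (d :: rest') = y :: l := by
        refine ⟨pvRenderRow (W0, W1, W2) (d :: List.take 2 rest'),
          pvRows (W0, W1, W2) (List.drop 2 rest'), ?_⟩
        simp [pvRows]
      simp [hrows, hyl, pvJoinCons, pvRenderRow, pvWidthAt, hmod, em1, em2, hcl, hnotlast,
        PySem.List.pyGetD, PySem.List.pyGet?, PySem.List.pyIdx?, pvJoinNil, pvJoinSingleton, pvJoinCons, String.append_assoc]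

lemma pvJoinGuard (sep : String) (rows : List String) :
    (if rows.length < 2 then
      match rows with
      | [] => ""
      | r :: _ => r
    else PySem.Str.join sep rows) = PySem.Str.join sep rows := by
  match rows with
  | [] => simp [pvJoinNil]
  | [r] => simp [pvJoinSingleton]
  | a :: b :: t => simp

lemma pvMaxGetD' (l : List (Int × String)) (c : Int) :
    (PySem.List.max?
        (((l.filter (fun p => PySem.Int.mod p.1 3 == c)).map (·.2)).map
          (fun file_name => PySem.Str.len file_name))
        (fun x => x)).getD 0 = pvW c l := by
  rw [pvMaxGetD]
  · rfl
  · intro x hx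
    simp only [List.mem_map] at hx
    obtain ⟨f, _, rfl⟩ := hx
    exact pvLen_nonneg f

lemma pvColLen (files : List String) :
    ((PySem.List.pyRange 0 (min 3 ((files.length : Int))) 1).foldl
      (fun cl column_index =>
        cl.set column_index.toNat
          ((PySem.List.max?
              ((((PySem.List.enumerate files).filter
                    (fun p => PySem.Int.mod p.1 3 == column_index)).map (·.2)).map
                (fun file_name => PySem.Str.len file_name))
              (fun x => x)).getD 0))
      (List.replicate 3 (0 : Int)))
    = [pvW 0 (PySem.List.enumerate files), pvW 1 (PySem.List.enumerate files),
       pvW 2 (PySem.List.enumerate files)] := by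
  rcases files with _ | ⟨a, _ | ⟨b, _ | ⟨c, rest⟩⟩⟩
  · simp [pvW, PySem.List.enumerate_nil]
  · have h1 : min (3 : Int) (([a].length : Int)) = 1 := by simp
    have hr : PySem.List.pyRange 0 1 1 = [0] := by decide
    have e1 : pvW 1 (PySem.List.enumerate [a]) = 0 := by
      simp [pvW, PySem.List.enumerate_cons, PySem.List.enumerate_nil]
    have e2 : pvW 2 (PySem.List.enumerate [a]) = 0 := by
      simp [pvW, PySem.List.enumerate_cons, PySem.List.enumerate_nil]
    rw [h1, hr]
    simp only [List.foldl_cons, List.foldl_nil, pvMaxGetD']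
    simp
    constructor <;> simp [pvW]
  · have h1 : min (3 : Int) (([a, b].length : Int)) = 2 := by simp
    have hr : PySem.List.pyRange 0 2 1 = [0, 1] := by decide
    have e2 : pvW 2 (PySem.List.enumerate [a, b]) = 0 := by
      simp [pvW, PySem.List.enumerate_cons, PySem.List.enumerate_nil]
    rw [h1, hr]
    simp only [List.foldl_cons, List.foldl_nil, pvMaxGetD']
    simp
    simp [pvW]
  · have h1 : min (3 : Int) (((a :: b :: c :: rest).length : Int)) = 3 := by
      simp; omega
    have hr : PySem.List.pyRange 0 3 1 = [0, 1, 2] := by decide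
    rw [h1, hr]
    simp only [List.foldl_cons, List.foldl_nil, pvMaxGetD']
    simp

-- ===== VERDICT (by name: the statement is the Claim_ definition above) =====
theorem get_ls_command_output_spec : Claim_equal_get_ls_command_output := by
  intro files tab_size tab_count _
  show get_ls_command_output files tab_size tab_count
      = get_ls_command_output_alt files tab_size tab_count
  simp only [get_ls_command_output, get_ls_command_output_alt]
  rw [pvJoinGuard, pvColLen files]
  rw [pvFormat_eq _ _ _ _ rfl
      ("\n" ++ String.ofList (List.replicate (tab_size.toNat * tab_count.toNat) ' '))
      ((files.length : Int)) files.length files rfl 0 "" le_rfl (by norm_num) (by simp)]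
  rw [pvWidths_eq files.length files rfl 0 le_rfl (by norm_num) 0 0 0 le_rfl le_rfl le_rfl]
  rw [max_eq_right (pvW_nonneg 0 _), max_eq_right (pvW_nonneg 1 _), max_eq_right (pvW_nonneg 2 _)]
  simp
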